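-- pv_equiv track=rewrite | github.com/Krazygamr/SNMP-Explorer | snmpexplorer/tabs/snmp_tab.py | _walk_covers_oid
-- ===== SOURCE A (Python) =====
-- def _walk_covers_oid(walk_list: list[str], oid: str) -> bool:
--     """
--     Returns True if any walk root covers this OID.
--     Coverage if oid == w or oid startswith w + '.'
--     """
--     if not oid:
--         return True
--     for w in walk_list or []:
--         w = str(w)
--         if oid == w or oid.startswith(w + "."):
--             return True
--     return False
-- ===== SOURCE B (Python) =====
-- def _walk_covers_oid(walk_list: list[str], oid: str) -> bool:
--     """
--     Returns True if any walk root covers this OID.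
--     Coverage if oid == w or oid startswith w + '.'
--     """
--     if not oid:
--         return True
--     roots = {str(w) for w in (walk_list or [])}
--     if oid in roots:
--         return True
--     return any(oid[i] == '.' and oid[:i] in roots for i in range(len(oid)))
-- ===== Notes on version B (the rewrite author's own statement) =====
-- stated objective: alternative
-- what changed: Instead of scanning walk_list and testing startswith(w + '.') per root, B builds a set of the roots once and checks which prefixes of oid (oid itself, and oid[:i] at each '.' position) are members, so the traversal is over oid's dot positions rather than over the root list.
import Mathlib
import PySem

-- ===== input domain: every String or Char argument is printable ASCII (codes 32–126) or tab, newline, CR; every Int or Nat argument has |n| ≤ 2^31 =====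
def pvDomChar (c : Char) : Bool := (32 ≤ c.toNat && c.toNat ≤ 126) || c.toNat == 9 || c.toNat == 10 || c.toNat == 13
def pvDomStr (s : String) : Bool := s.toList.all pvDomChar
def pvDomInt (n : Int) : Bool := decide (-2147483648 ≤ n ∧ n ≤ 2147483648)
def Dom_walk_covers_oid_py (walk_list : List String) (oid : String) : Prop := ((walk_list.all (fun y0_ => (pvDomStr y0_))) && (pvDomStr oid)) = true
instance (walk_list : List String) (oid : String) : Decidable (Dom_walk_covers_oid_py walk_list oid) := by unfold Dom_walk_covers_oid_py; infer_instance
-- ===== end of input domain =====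

-- B replaces A's scan of walk_list with startswith tests by a set of roots queried at oid's dot positions (alternative decomposition, same cost class).


-- ===== PORT A =====
-- A: if not oid: return True; for w in walk_list: if oid == w or oid.startswith(w + "."): return True; return False
def walk_covers_oid_py (walk_list : List String) (oid : String) : Bool :=
  if oid.toList.isEmpty then true
  else walk_list.any (fun w =>
    oid.toList == w.toList || PySem.Chars.startswith oid.toList (w.toList ++ ['.']))

-- ===== PORT B =====
-- B: roots = set of walk roots; check oid itself, then oid[:i] for each i with oid[i] == '.'
def walk_covers_oid_py_alt (walk_list : List String) (oid : String) : Bool :=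
  if oid.toList.isEmpty then true
  else
    let roots : PySem.Set (List Char) := PySem.Set.ofList (walk_list.map (fun w => w.toList))
    if roots.contains oid.toList then true
    else (List.range oid.toList.length).any (fun i =>
      oid.toList[i]! == '.' && roots.contains (oid.toList.take i))

-- ===== PRECONDITION & SPEC =====
def Spec_walk_covers_oid_py (walk_list : List String) (oid : String) (out : Bool) : Prop := out = walk_covers_oid_py_alt walk_list oid
instance (walk_list : List String) (oid : String) (out : Bool) : Decidable (Spec_walk_covers_oid_py walk_list oid out) := by unfold Spec_walk_covers_oid_py; infer_instance

-- ===== CLAIM (what is proved, stated in full; the proofs are below) =====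
def Claim_equal_walk_covers_oid_py : Prop := ∀ (walk_list : List String) (oid : String), Dom_walk_covers_oid_py walk_list oid → Spec_walk_covers_oid_py walk_list oid (walk_covers_oid_py walk_list oid)

-- ===== LEMMAS AND PROOFS =====

-- startswith by (ws ++ ['.']) is exactly: some dot position i has the prefix up to i equal to ws
lemma startswith_dot_iff (cs ws : List Char) :
    PySem.Chars.startswith cs (ws ++ ['.']) = true ↔
      ∃ i, i < cs.length ∧ cs.take i = ws ∧ cs[i]! = '.' := by
  simp only [PySem.Chars.startswith, List.isPrefixOf_iff_prefix]
  constructor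
  · rintro ⟨t, ht⟩
    subst ht
    have h1 : ws.length < (ws ++ ['.'] ++ t).length := by
      simp only [List.length_append, List.length_cons, List.length_nil]
      omega
    refine ⟨ws.length, h1, ?_, ?_⟩
    · rw [List.append_assoc]
      exact List.take_left' rfl
    · rw [getElem!_pos (ws ++ ['.'] ++ t) ws.length h1, List.getElem_append_left (by simp)]
      simp
  · rintro ⟨i, hi, hw, hd⟩
    have hget : cs[i]'hi = '.' := by rw [getElem!_pos cs i hi] at hd; exact hd
    have : cs.take (i + 1) = ws ++ ['.'] := by
      rw [List.take_add_one, ← hw]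
      simp [List.getElem?_eq_getElem hi, hget]
    rw [← this]
    exact List.take_prefix _ _

-- the two exists-forms coincide
lemma covers_iff (walk_list : List String) (cs : List Char) :
    (∃ w ∈ walk_list, cs = w.toList ∨ PySem.Chars.startswith cs (w.toList ++ ['.']) = true) ↔
      ((∃ w ∈ walk_list, cs = w.toList) ∨
        ∃ i, i < cs.length ∧ cs[i]! = '.' ∧ ∃ w ∈ walk_list, cs.take i = w.toList) := by
  constructor
  · rintro ⟨w, hw, heq | hpre⟩
    · exact Or.inl ⟨w, hw, heq⟩
    · obtain ⟨i, hi, ht, hd⟩ := (startswith_dot_iff cs w.toList).mp hpre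
      exact Or.inr ⟨i, hi, hd, w, hw, ht⟩
  · rintro (⟨w, hw, heq⟩ | ⟨i, hi, hd, w, hw, ht⟩)
    · exact ⟨w, hw, Or.inl heq⟩
    · exact ⟨w, hw, Or.inr ((startswith_dot_iff cs w.toList).mpr ⟨i, hi, ht, hd⟩)⟩

-- ===== VERDICT (by name: the statement is the Claim_ definition above) =====
theorem walk_covers_oid_py_spec : Claim_equal_walk_covers_oid_py := by
  intro walk_list oid _
  unfold Spec_walk_covers_oid_py walk_covers_oid_py walk_covers_oid_py_alt
  by_cases he : oid.toList.isEmpty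
  · simp [he]
  · simp only [he]
    set cs := oid.toList with hcs
    have hmem : ∀ l : List Char, (PySem.Set.ofList (walk_list.map (fun w => w.toList))).contains l = true
        ↔ ∃ w ∈ walk_list, l = w.toList := by
      intro l
      rw [PySem.Set.contains_iff, PySem.Set.mem_ofList]
      simp [eq_comm]
    rcases h : walk_list.any (fun w =>
        cs == w.toList || PySem.Chars.startswith cs (w.toList ++ ['.'])) with _ | _
    · -- A returned false: neither branch of B can be true
      rw [List.any_eq_false] at h
      have hnone : ¬ ((∃ w ∈ walk_list, cs = w.toList) ∨
          ∃ i, i < cs.length ∧ cs[i]! = '.' ∧ ∃ w ∈ walk_list, cs.take i = w.toList) := by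
        rw [← covers_iff]
        rintro ⟨w, hw, hor⟩
        have := h w hw
        simp only [Bool.or_eq_true, beq_iff_eq, not_or] at this
        tauto
      rcases hc : (PySem.Set.ofList (walk_list.map (fun w => w.toList))).contains cs with _ | _
      · simp only [hc, Bool.false_eq_true, if_false]
        symm
        rw [List.any_eq_false]
        intro i hi
        rw [List.mem_range] at hi
        simp only [Bool.and_eq_true, beq_iff_eq, not_and]
        intro hd hcon
        exact hnone (Or.inr ⟨i, hi, hd, (hmem _).mp hcon⟩)
      · exact absurd (Or.inl ((hmem cs).mp hc)) hnone
    · -- A returned true: some branch of B fires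
      rw [List.any_eq_true] at h
      obtain ⟨w, hw, hww⟩ := h
      simp only [Bool.or_eq_true, beq_iff_eq] at hww
      have := (covers_iff walk_list cs).mp ⟨w, hw, hww⟩
      rcases this with hfull | ⟨i, hi, hd, hpre⟩
      · rw [(hmem cs).mpr hfull]
        simp
      · rcases hc : (PySem.Set.ofList (walk_list.map (fun w => w.toList))).contains cs with _ | _
        · simp only [hc, Bool.false_eq_true, if_false]
          symm
          rw [List.any_eq_true]
          refine ⟨i, List.mem_range.mpr hi, ?_⟩
          rw [Bool.and_eq_true, beq_iff_eq]
          exact ⟨hd, (hmem _).mpr hpre⟩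
        · rw [if_pos hc]
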